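-- pv_equiv track=rewrite | github.com/simafi/Simafi-Web | backend/contabilidad/management/commands/load_catalogo_contable.py | es_codigo_padre
-- ===== SOURCE A (Python) =====
-- def es_codigo_padre(codigo_hijo, codigo_candidato):
--     """True si codigo_candidato es prefijo de codigo_hijo (por segmentos)."""
--     if not codigo_candidato or not codigo_hijo:
--         return False
--     # Comparar por segmentos separados por guión
--     partes_hijo = codigo_hijo.replace('-', '-').split('-')
--     partes_cand = codigo_candidato.replace('-', '-').split('-')
--     if len(partes_cand) >= len(partes_hijo):
--         return False
--     for i, p in enumerate(partes_cand):
--         if i >= len(partes_hijo) or partes_hijo[i] != p: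
--             return False
--     return True
-- ===== SOURCE B (Python) =====
-- def es_codigo_padre(codigo_hijo, codigo_candidato):
--     """True si codigo_candidato es prefijo de codigo_hijo (por segmentos)."""
--     if not codigo_candidato or not codigo_hijo:
--         return False
--     return codigo_hijo.startswith(codigo_candidato + '-')
-- ===== Notes on version B (the rewrite author's own statement) =====
-- stated objective: simpler
-- what changed: Replaces the split-into-segment-lists plus indexed comparison loop with a single string prefix test: codigo_hijo.startswith(codigo_candidato + '-'), whose appended '-' encodes both the segment-boundary alignment and the strictly-more-segments requirement.
import Mathlib
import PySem

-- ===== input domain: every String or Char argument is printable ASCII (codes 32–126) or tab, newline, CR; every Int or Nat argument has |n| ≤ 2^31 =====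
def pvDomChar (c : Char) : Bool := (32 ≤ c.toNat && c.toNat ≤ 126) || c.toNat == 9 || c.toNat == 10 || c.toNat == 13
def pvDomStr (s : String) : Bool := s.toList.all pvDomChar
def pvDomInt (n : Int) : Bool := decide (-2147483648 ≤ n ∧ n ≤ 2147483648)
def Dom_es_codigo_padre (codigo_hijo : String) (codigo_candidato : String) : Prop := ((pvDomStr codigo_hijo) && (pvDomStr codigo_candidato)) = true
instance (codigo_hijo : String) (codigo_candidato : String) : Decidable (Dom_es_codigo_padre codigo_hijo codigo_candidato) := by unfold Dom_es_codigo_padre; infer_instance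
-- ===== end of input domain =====

-- B replaces A's split-into-segments plus indexed comparison loop by a single
-- prefix test: codigo_hijo.startswith(codigo_candidato + '-') (simpler, no loop).

-- ===== PORT A =====
def es_codigo_padre (codigo_hijo : String) (codigo_candidato : String) : Bool :=
  if codigo_candidato.toList.isEmpty || codigo_hijo.toList.isEmpty then false
  else
    let partes_hijo := PySem.Chars.splitOn (PySem.Chars.replace codigo_hijo.toList ['-'] ['-']) ['-']
    let partes_cand := PySem.Chars.splitOn (PySem.Chars.replace codigo_candidato.toList ['-'] ['-']) ['-']
    if partes_hijo.length ≤ partes_cand.length then false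
    else
      -- for i, p in enumerate(partes_cand): if i >= len(partes_hijo) or partes_hijo[i] != p: return False
      (PySem.List.enumerate partes_cand).all fun ip =>
        !(decide ((partes_hijo.length : Int) ≤ ip.1) || !(PySem.List.pyGetD partes_hijo ip.1 [] == ip.2))

-- ===== PORT B =====
def es_codigo_padre_alt (codigo_hijo : String) (codigo_candidato : String) : Bool :=
  if codigo_candidato.toList.isEmpty || codigo_hijo.toList.isEmpty then false
  else PySem.Chars.startswith codigo_hijo.toList (codigo_candidato.toList ++ ['-'])

-- ===== PRECONDITION & SPEC =====
def Spec_es_codigo_padre (codigo_hijo : String) (codigo_candidato : String) (out : Bool) : Prop := out = es_codigo_padre_alt codigo_hijo codigo_candidato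
instance (codigo_hijo : String) (codigo_candidato : String) (out : Bool) : Decidable (Spec_es_codigo_padre codigo_hijo codigo_candidato out) := by unfold Spec_es_codigo_padre; infer_instance

-- ===== CLAIM (what is proved, stated in full; the proofs are below) =====
def Claim_equal_es_codigo_padre : Prop := ∀ (codigo_hijo : String) (codigo_candidato : String), Dom_es_codigo_padre codigo_hijo codigo_candidato → Spec_es_codigo_padre codigo_hijo codigo_candidato (es_codigo_padre codigo_hijo codigo_candidato)

-- ===== LEMMAS AND PROOFS =====

/-- Simple structural model of `s.split('-')`. -/
def split1 : List Char → List (List Char)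
  | [] => [[]]
  | c :: t =>
    if c = '-' then [] :: split1 t
    else match split1 t with
      | [] => [[c]]          -- unreachable
      | p :: ps => (c :: p) :: ps

theorem split1_ne_nil (s : List Char) : split1 s ≠ [] := by
  cases s with
  | nil => simp [split1]
  | cons c t =>
    simp only [split1]
    split
    · simp
    · split <;> simp

theorem split1_cons_sep (t : List Char) : split1 ('-' :: t) = [] :: split1 t := by
  simp [split1]

theorem split1_cons_ne (c : Char) (t : List Char) (hc : c ≠ '-') (p : List Char)
    (ps : List (List Char)) (hp : split1 t = p :: ps) :
    split1 (c :: t) = (c :: p) :: ps := by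
  simp [split1, hc, hp]

theorem replace_go_self : ∀ (fuel : Nat) (l acc : List Char), l.length ≤ fuel →
    PySem.Chars.replace.go ['-'] ['-'] fuel l acc = acc.reverse ++ l := by
  intro fuel
  induction fuel with
  | zero =>
    intro l acc hl
    have : l = [] := List.eq_nil_of_length_eq_zero (Nat.le_zero.mp hl)
    subst this
    simp [PySem.Chars.replace.go]
  | succ n ih =>
    intro l acc hl
    cases l with
    | nil => simp [PySem.Chars.replace.go]
    | cons c t =>
      simp only [PySem.Chars.replace.go]
      by_cases hc : c = '-'
      · subst hc
        rw [if_pos (by simp [List.isPrefixOf])]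
        simp only [List.length, List.drop_succ_cons, List.drop_zero, List.reverse_singleton,
          List.singleton_append]
        rw [ih t ('-' :: acc) (by simpa using Nat.lt_succ_iff.mp (by simpa using hl))]
        simp
      · rw [if_neg (by simp [List.isPrefixOf]; exact fun hh => hc hh.symm)]
        rw [ih t (c :: acc) (by simpa using Nat.lt_succ_iff.mp (by simpa using hl))]
        simp

theorem replace_self (s : List Char) : PySem.Chars.replace s ['-'] ['-'] = s := by
  simp [PySem.Chars.replace, replace_go_self s.length s [] (le_refl _)]

/-- head-prepend helper describing `splitOn.go`'s accumulator. -/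
def mh (x : List Char) : List (List Char) → List (List Char)
  | [] => [x]
  | p :: ps => (x ++ p) :: ps

theorem splitOn_go_eq : ∀ (fuel : Nat) (l cur : List Char) (acc : List (List Char)),
    l.length < fuel →
    PySem.Chars.splitOn.go ['-'] fuel l cur acc = acc.reverse ++ mh cur.reverse (split1 l) := by
  intro fuel
  induction fuel with
  | zero => intro l cur acc h; omega
  | succ n ih =>
    intro l cur acc hl
    cases l with
    | nil => simp [PySem.Chars.splitOn.go, split1, mh]
    | cons c t =>
      simp only [PySem.Chars.splitOn.go]
      by_cases hc : c = '-'
      · subst hc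
        rw [if_pos (by simp [List.isPrefixOf])]
        simp only [List.length, List.drop_succ_cons, List.drop_zero]
        rw [ih t [] (cur.reverse :: acc) (by simpa using hl)]
        obtain ⟨p, ps, hp⟩ : ∃ p ps, split1 t = p :: ps := by
          cases h : split1 t with
          | nil => exact absurd h (split1_ne_nil t)
          | cons p ps => exact ⟨p, ps, rfl⟩
        rw [split1_cons_sep, hp]
        simp [mh]
      · rw [if_neg (by simp [List.isPrefixOf]; exact fun hh => hc hh.symm)]
        rw [ih t (c :: cur) acc (by simpa using Nat.lt_succ_iff.mp (by simpa using hl))]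
        obtain ⟨p, ps, hp⟩ : ∃ p ps, split1 t = p :: ps := by
          cases h : split1 t with
          | nil => exact absurd h (split1_ne_nil t)
          | cons p ps => exact ⟨p, ps, rfl⟩
        rw [split1_cons_ne c t hc p ps hp, hp]
        simp [mh]

theorem splitOn_eq_split1 (s : List Char) : PySem.Chars.splitOn s ['-'] = split1 s := by
  rw [PySem.Chars.splitOn, splitOn_go_eq (s.length + 1) s [] [] (Nat.lt_succ_self _)]
  obtain ⟨p, ps, hp⟩ : ∃ p ps, split1 s = p :: ps := by
    cases h : split1 s with
    | nil => exact absurd h (split1_ne_nil s)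
    | cons p ps => exact ⟨p, ps, rfl⟩
  simp [hp, mh]

theorem join_cons' (a : Char) (p : List Char) (ps : List (List Char)) :
    PySem.Chars.join ['-'] ((a :: p) :: ps) = a :: PySem.Chars.join ['-'] (p :: ps) := by
  cases ps with
  | nil => simp [PySem.Chars.join_singleton]
  | cons q qs => simp [PySem.Chars.join_cons_cons]

theorem join_split1 (s : List Char) : PySem.Chars.join ['-'] (split1 s) = s := by
  induction s with
  | nil => simp [split1, PySem.Chars.join_singleton]
  | cons c t ih =>
    by_cases hc : c = '-'
    · subst hc
      obtain ⟨p, ps, hp⟩ : ∃ p ps, split1 t = p :: ps := by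
        cases h : split1 t with
        | nil => exact absurd h (split1_ne_nil t)
        | cons p ps => exact ⟨p, ps, rfl⟩
      rw [split1_cons_sep, hp, PySem.Chars.join_cons_cons]
      rw [hp] at ih
      simp [ih]
    · obtain ⟨p, ps, hp⟩ : ∃ p ps, split1 t = p :: ps := by
        cases h : split1 t with
        | nil => exact absurd h (split1_ne_nil t)
        | cons p ps => exact ⟨p, ps, rfl⟩
      rw [split1_cons_ne c t hc p ps hp, join_cons', ← hp, ih]

theorem split1_append (a b : List Char) :
    split1 (a ++ '-' :: b) = split1 a ++ split1 b := by
  induction a with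
  | nil => simp [split1]
  | cons c a' ih =>
    by_cases hc : c = '-'
    · subst hc
      rw [List.cons_append, split1_cons_sep, split1_cons_sep, ih, List.cons_append]
    · obtain ⟨p, ps, hp⟩ : ∃ p ps, split1 a' = p :: ps := by
        cases h : split1 a' with
        | nil => exact absurd h (split1_ne_nil a')
        | cons p ps => exact ⟨p, ps, rfl⟩
      have h2 : split1 (a' ++ '-' :: b) = p :: (ps ++ split1 b) := by
        rw [ih, hp, List.cons_append]
      rw [List.cons_append, split1_cons_ne c (a' ++ '-' :: b) hc p (ps ++ split1 b) h2,
        split1_cons_ne c a' hc p ps hp, List.cons_append]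

theorem join_append_ne (ys zs : List (List Char)) (hy : ys ≠ []) (hz : zs ≠ []) :
    PySem.Chars.join ['-'] (ys ++ zs) =
      PySem.Chars.join ['-'] ys ++ '-' :: PySem.Chars.join ['-'] zs := by
  induction ys with
  | nil => exact absurd rfl hy
  | cons y ys' ih =>
    cases ys' with
    | nil =>
      cases zs with
      | nil => exact absurd rfl hz
      | cons z zs' => simp [PySem.Chars.join_cons_cons, PySem.Chars.join_singleton]
    | cons y2 ys'' =>
      have h2 := ih (by simp)
      rw [List.cons_append, PySem.Chars.join_cons_cons]
      rw [List.cons_append] at h2 ⊢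
      rw [PySem.Chars.join_cons_cons, h2]
      simp

/-- The core correspondence: A's "strictly fewer segments and segmentwise prefix"
    is exactly B's "candidate ++ '-' is a string prefix". -/
theorem key_iff (h c : List Char) :
    ((split1 c).length < (split1 h).length ∧ split1 c <+: split1 h) ↔ (c ++ ['-']) <+: h := by
  constructor
  · rintro ⟨hlen, t, ht⟩
    have htne : t ≠ [] := by
      intro h0; subst h0; simp at ht; rw [ht] at hlen; omega
    have hh : h = c ++ '-' :: PySem.Chars.join ['-'] t := by
      calc h = PySem.Chars.join ['-'] (split1 h) := (join_split1 h).symm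
        _ = PySem.Chars.join ['-'] (split1 c ++ t) := by rw [ht]
        _ = PySem.Chars.join ['-'] (split1 c) ++ '-' :: PySem.Chars.join ['-'] t :=
            join_append_ne _ _ (split1_ne_nil c) htne
        _ = c ++ '-' :: PySem.Chars.join ['-'] t := by rw [join_split1]
    exact ⟨PySem.Chars.join ['-'] t, by rw [hh]; simp⟩
  · rintro ⟨r, hr⟩
    have hh : h = c ++ '-' :: r := by rw [← hr]; simp
    subst hh
    rw [split1_append]
    constructor
    · have := List.length_pos_of_ne_nil (split1_ne_nil r)
      simp; omega
    · exact List.prefix_append _ _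

theorem loop_eq (xs ys : List (List Char)) : ∀ (s : Nat),
    ((PySem.List.enumerate xs (s : Int)).all fun ip =>
        !(decide ((ys.length : Int) ≤ ip.1) || !(PySem.List.pyGetD ys ip.1 [] == ip.2)))
      = decide (xs <+: ys.drop s) := by
  induction xs with
  | nil => intro s; simp [PySem.List.enumerate]
  | cons x xs' ih =>
    intro s
    rw [PySem.List.enumerate_cons]
    have hcast : (s : Int) + 1 = ((s + 1 : Nat) : Int) := by push_cast; ring
    rw [List.all_cons, hcast, ih (s + 1)]
    by_cases hs : s < ys.length
    · have h1 : decide ((ys.length : Int) ≤ (s : Int)) = false := by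
        simp; exact_mod_cast hs
      rw [h1, PySem.List.pyGetD_natCast, List.getD_eq_getElem _ _ hs]
      have hdrop : ys.drop s = ys[s] :: ys.drop (s + 1) := List.drop_eq_getElem_cons hs
      rw [hdrop]
      have hrhs : decide (x :: xs' <+: ys[s] :: ys.drop (s + 1))
          = ((ys[s] == x) && decide (xs' <+: ys.drop (s + 1))) := by
        rw [Bool.eq_iff_iff]
        simp only [decide_eq_true_eq, Bool.and_eq_true, beq_iff_eq, List.cons_prefix_cons]
        constructor
        · rintro ⟨ha, hb⟩; exact ⟨ha.symm, by simp [hb]⟩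
        · rintro ⟨ha, hb⟩; exact ⟨ha.symm, by simpa using hb⟩
      rw [hrhs]
      cases ys[s] == x <;> simp
    · have h1 : decide ((ys.length : Int) ≤ (s : Int)) = true := by
        simp; exact_mod_cast Nat.le_of_not_lt hs
      have hys : ys.drop s = [] := List.drop_eq_nil_of_le (Nat.le_of_not_lt hs)
      rw [h1, hys]
      simp

-- ===== VERDICT (by name: the statement is the Claim_ definition above) =====
theorem es_codigo_padre_spec : Claim_equal_es_codigo_padre := by
  intro h c _
  unfold Spec_es_codigo_padre es_codigo_padre es_codigo_padre_alt
  by_cases hg : c.toList.isEmpty || h.toList.isEmpty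
  · rw [if_pos hg, if_pos hg]
  · rw [if_neg hg, if_neg hg]
    simp only [replace_self, splitOn_eq_split1]
    have hloop := loop_eq (split1 c.toList) (split1 h.toList) 0
    rw [List.drop_zero] at hloop
    have hsw : PySem.Chars.startswith h.toList (c.toList ++ ['-'])
        = decide ((c.toList ++ ['-']) <+: h.toList) := by
      rw [Bool.eq_iff_iff]
      simp only [decide_eq_true_eq]
      exact PySem.Chars.startswith_iff _ _
    rw [hsw]
    by_cases hlen : (split1 h.toList).length ≤ (split1 c.toList).length
    · rw [if_pos hlen]
      have : ¬ ((c.toList ++ ['-']) <+: h.toList) := by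
        intro hp
        have := (key_iff h.toList c.toList).mpr hp
        omega
      simp [this]
    · rw [if_neg hlen]
      show ((PySem.List.enumerate (split1 c.toList) 0).all _) = _
      have h0 : (0 : Int) = ((0 : Nat) : Int) := by norm_num
      rw [h0, hloop]
      by_cases hp : split1 c.toList <+: split1 h.toList
      · have := (key_iff h.toList c.toList).mp ⟨Nat.lt_of_not_le hlen, hp⟩
        simp [hp, this]
      · have : ¬ ((c.toList ++ ['-']) <+: h.toList) := by
          intro hq
          exact hp ((key_iff h.toList c.toList).mpr hq).2
        simp [hp, this]
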